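-- pv_equiv track=rewrite | github.com/future-protag/tts-reader-local | tts_reader.py | clean_text_for_speech
-- ===== SOURCE A (Python) =====
-- def clean_text_for_speech(text):
--     """Clean up text so line breaks become natural pauses when spoken.
--
--     The TTS engine treats line breaks as just a space, so text like:
--         "Line one\\nLine two"
--     gets read as one long sentence. This function adds punctuation at
--     line endings so the TTS engine pauses naturally.
--     """
--     # Split into lines, keeping track of blank lines (paragraph breaks)
--     lines = text.splitlines()
--
--     # Characters that already signal a pause to the TTS engine
--     pause_punctuation = ".!?;:,"
--
--     cleaned_parts = []
--     for i, line in enumerate(lines):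
--         stripped = line.strip()
--
--         # Skip blank lines but mark a paragraph break
--         if not stripped:
--             # Only add a paragraph break if we already have some text
--             if cleaned_parts:
--                 cleaned_parts.append("\n\n")
--             continue
--
--         # If the line doesn't end with punctuation, add a period
--         if stripped and stripped[-1] not in pause_punctuation:
--             stripped += "."
--
--         cleaned_parts.append(stripped)
--
--     # Join everything with spaces (paragraph breaks are already "\n\n")
--     result = ""
--     for part in cleaned_parts:
--         if part == "\n\n":
--             result += "\n\n"
--         elif result and not result.endswith("\n"):
--             result += " " + part
--         else:
--             result += part
--
--     return result.strip()
-- ===== SOURCE B (Python) =====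
-- def clean_text_for_speech(text):
--     """Clean up text so line breaks become natural pauses when spoken.
--
--     Single pass: builds the output pieces directly, tracking pending blank
--     lines as a counter instead of inserting marker elements and re-joining.
--     """
--     out = []
--     pending = 0
--     for line in text.splitlines():
--         s = line.strip()
--         if not s:
--             if out:
--                 pending += 1
--             continue
--         if s[-1] not in ".!?;:,":
--             s += "."
--         if out:
--             out.append("\n\n" * pending if pending else " ")
--         pending = 0
--         out.append(s)
--     return "".join(out)
-- ===== Notes on version B (the rewrite author's own statement) =====
-- stated objective: simpler
-- what changed: B replaces A's intermediate marker-list plus a second join loop (with an endswith-newline test) by a single pass over the lines that keeps the output pieces and an integer count of pending blank lines, and needs no final strip.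
import Mathlib
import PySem

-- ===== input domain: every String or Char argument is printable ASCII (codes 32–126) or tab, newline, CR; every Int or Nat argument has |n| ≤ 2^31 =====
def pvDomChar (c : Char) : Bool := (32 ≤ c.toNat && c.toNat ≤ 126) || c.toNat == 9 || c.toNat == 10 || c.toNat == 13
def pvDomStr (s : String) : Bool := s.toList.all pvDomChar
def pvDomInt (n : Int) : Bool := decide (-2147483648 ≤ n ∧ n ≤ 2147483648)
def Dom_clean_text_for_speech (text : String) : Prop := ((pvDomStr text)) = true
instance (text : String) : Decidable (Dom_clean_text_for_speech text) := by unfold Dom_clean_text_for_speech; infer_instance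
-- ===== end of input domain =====

-- B replaces A's marker-list plus second join loop by one pass that keeps the output
-- pieces and a pending-blank-line counter (objective: simpler).

-- ===== PORT A =====
-- first loop of A: build cleaned_parts (blank lines become "\n\n" markers)
def pvPartsStep (parts : List (List Char)) (line : List Char) : List (List Char) :=
  let stripped := PySem.Chars.strip line
  if stripped = [] then
    (if parts = [] then parts else parts ++ [['\n', '\n']])
  else
    match PySem.List.pyGet? stripped (-1) with
    | some c =>
        parts ++ [if PySem.Chars.isIn [c] ".!?;:,".toList then stripped else stripped ++ ['.']]
    | none => parts  -- unreachable: stripped ≠ [] here, so stripped[-1] exists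

-- second loop of A: join the parts into result
def pvJoinStep (result : List Char) (part : List Char) : List Char :=
  if part = ['\n', '\n'] then result ++ ['\n', '\n']
  else if result ≠ [] ∧ PySem.Chars.endswith result ['\n'] = false then result ++ ([' '] ++ part)
  else result ++ part

def clean_text_for_speech (text : String) : String :=
  let lines := (PySem.Str.splitlines text).map String.toList
  let cleaned_parts := lines.foldl pvPartsStep []
  let result := cleaned_parts.foldl pvJoinStep []
  String.ofList (PySem.Chars.strip result)

-- ===== PORT B =====
-- single pass of B: state = (output pieces, pending blank-line count)
def pvAltStep (st : List (List Char) × Nat) (line : List Char) : List (List Char) × Nat :=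
  let s := PySem.Chars.strip line
  if s = [] then
    (if st.1 = [] then st else (st.1, st.2 + 1))
  else
    match PySem.List.pyGet? s (-1) with
    | some c =>
        let s' := if PySem.Chars.isIn [c] ".!?;:,".toList then s else s ++ ['.']
        if st.1 = [] then ([s'], 0)
        else (st.1 ++ [(if st.2 = 0 then [' '] else (List.replicate st.2 ['\n', '\n']).flatten), s'], 0)
    | none => st  -- unreachable: s ≠ [] here, so s[-1] exists

def clean_text_for_speech_alt (text : String) : String :=
  String.ofList (PySem.Chars.join []
    (((PySem.Str.splitlines text).map String.toList).foldl pvAltStep ([], 0)).1)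

-- ===== PRECONDITION & SPEC =====
def Spec_clean_text_for_speech (text : String) (out : String) : Prop := out = clean_text_for_speech_alt text
instance (text : String) (out : String) : Decidable (Spec_clean_text_for_speech text out) := by unfold Spec_clean_text_for_speech; infer_instance

-- ===== CLAIM (what is proved, stated in full; the proofs are below) =====
def Claim_equal_clean_text_for_speech : Prop := ∀ (text : String), Dom_clean_text_for_speech text → Spec_clean_text_for_speech text (clean_text_for_speech text)

-- ===== LEMMAS AND PROOFS =====

-- a chunk with no whitespace at either end (what strip produces, what the output keeps at its ends)
def pvNoWs (cs : List Char) : Prop :=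
  cs ≠ [] ∧ (∀ h, cs.head? = some h → PySem.Chars.isspace h = false) ∧
    (∀ l, cs.getLast? = some l → PySem.Chars.isspace l = false)

theorem pvPyGet_neg_one (s : List Char) (h : s ≠ []) : PySem.List.pyGet? s (-1) = s.getLast? := by
  have hl : s.length ≠ 0 := by simpa using h
  simp [PySem.List.pyGet?, PySem.List.pyIdx?]
  split
  · simp [List.getLast?_eq_getElem?]
  · omega

theorem pvHead?_dropWhile_false (p : Char → Bool) (l : List Char) (h : (l.dropWhile p).head? = some x) :
    p x = false := by
  have hne : l.dropWhile p ≠ [] := by intro e; rw [e] at h; simp at h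
  have hx : (l.dropWhile p).head hne = x := by
    rw [List.head?_eq_some_head hne] at h; exact Option.some.inj h
  rw [← hx]; exact List.head_dropWhile_not p hne

theorem pvGetLast?_of_suffix {s l : List Char} (hs : s <:+ l) (h : s ≠ []) :
    l.getLast? = s.getLast? := by
  obtain ⟨t, rfl⟩ := hs
  exact List.getLast?_append_of_ne_nil t h

theorem pvDropWhile_of_head (p : Char → Bool) (l : List Char) (x : Char)
    (hx : l.head? = some x) (hpx : p x = false) : l.dropWhile p = l := by
  cases l with
  | nil => rfl
  | cons a t =>
    have : a = x := Option.some.inj hx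
    subst this
    simp [hpx]

theorem pvNoWs_strip (l : List Char) (h : PySem.Chars.strip l ≠ []) : pvNoWs (PySem.Chars.strip l) := by
  simp only [PySem.Chars.strip, PySem.Chars.rstrip, PySem.Chars.lstrip] at *
  set m := List.dropWhile PySem.Chars.isspace l with hm
  set d := List.dropWhile PySem.Chars.isspace m.reverse with hd
  have hdne : d ≠ [] := by intro e; rw [e] at h; simp at h
  refine ⟨h, ?_, ?_⟩
  · intro x hx
    rw [List.head?_reverse] at hx
    have hsuf : d <:+ m.reverse := List.dropWhile_suffix _
    have : m.reverse.getLast? = d.getLast? := pvGetLast?_of_suffix hsuf hdne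
    rw [← this, List.getLast?_reverse, hm] at hx
    exact pvHead?_dropWhile_false _ l hx
  · intro x hx
    rw [List.getLast?_reverse] at hx
    exact pvHead?_dropWhile_false _ m.reverse hx

theorem pvNoWs_append (a mid b : List Char) (ha : pvNoWs a) (hb : pvNoWs b) :
    pvNoWs (a ++ (mid ++ b)) := by
  refine ⟨by simp [ha.1], ?_, ?_⟩
  · intro x hx
    rw [List.head?_append] at hx
    cases hha : a.head? with
    | none => exact absurd (List.head?_eq_none_iff.mp hha) ha.1
    | some y =>
      rw [hha] at hx
      simp at hx
      exact hx ▸ ha.2.1 y hha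
  · intro x hx
    rw [List.getLast?_append_of_ne_nil a (by simp [hb.1]),
        List.getLast?_append_of_ne_nil mid hb.1] at hx
    exact hb.2.2 x hx

theorem pvNoWs_dot (s : List Char) (hs : pvNoWs s) : pvNoWs (s ++ ['.']) := by
  refine ⟨by simp, ?_, ?_⟩
  · intro x hx
    rw [List.head?_append] at hx
    cases hha : s.head? with
    | none => exact absurd (List.head?_eq_none_iff.mp hha) hs.1
    | some y =>
      rw [hha] at hx
      simp at hx
      exact hx ▸ hs.2.1 y hha
  · intro x hx
    rw [List.getLast?_append_of_ne_nil s (by simp)] at hx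
    simp at hx
    subst hx
    decide

theorem pvStrip_append_ws (J pad : List Char) (hJ : pvNoWs J)
    (hp : ∀ c ∈ pad, PySem.Chars.isspace c = true) : PySem.Chars.strip (J ++ pad) = J := by
  obtain ⟨hne, hhead, hlast⟩ := hJ
  simp only [PySem.Chars.strip, PySem.Chars.rstrip, PySem.Chars.lstrip]
  cases J with
  | nil => exact absurd rfl hne
  | cons h t =>
    have hph : PySem.Chars.isspace h = false := hhead h rfl
    rw [List.cons_append, List.dropWhile_cons_of_neg (by simp [hph])]
    rw [show (h :: (t ++ pad)).reverse = pad.reverse ++ (h :: t).reverse by simp]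
    rw [List.dropWhile_append]
    have hpadnil : List.dropWhile PySem.Chars.isspace pad.reverse = [] :=
      List.dropWhile_eq_nil_iff.mpr (fun x hx => hp x (List.mem_reverse.mp hx))
    rw [hpadnil]
    simp only [List.isEmpty_nil, if_pos]
    obtain ⟨lc, hlc⟩ : ∃ lc, (h :: t).getLast? = some lc :=
      Option.ne_none_iff_exists'.mp (by simp [List.getLast?_eq_none_iff])
    rw [pvDropWhile_of_head _ _ lc (by rw [List.head?_reverse]; exact hlc) (hlast lc hlc)]
    simp

theorem pvEndswith_false (J : List Char) (h : pvNoWs J) :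
    PySem.Chars.endswith J ['\n'] = false := by
  by_contra hc
  rw [Bool.not_eq_false, PySem.Chars.endswith_iff] at hc
  obtain ⟨t, rfl⟩ := hc
  have := h.2.2 '\n' (by rw [List.getLast?_append_of_ne_nil t (by simp)]; rfl)
  rw [show PySem.Chars.isspace '\n' = true from by decide] at this
  exact absurd this (by decide)

theorem pvEndswith_true (R : List Char) (hx : R.getLast? = some '\n') :
    PySem.Chars.endswith R ['\n'] = true := by
  rw [PySem.Chars.endswith_iff]
  have hne : R ≠ [] := by intro e; rw [e] at hx; simp at hx
  refine ⟨R.dropLast, ?_⟩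
  have : R.getLast hne = '\n' := by
    rw [List.getLast?_eq_some_getLast hne] at hx; exact Option.some.inj hx
  rw [← this]
  exact List.dropLast_append_getLast hne

theorem pvGetLast?_replicate (n : Nat) (a : Char) (h : n ≠ 0) :
    (List.replicate n a).getLast? = some a := by
  cases n with
  | zero => exact absurd rfl h
  | succ m => rw [List.replicate_succ']; simp

theorem pvFlattenRepl (n : Nat) :
    (List.replicate n ['\n', '\n']).flatten = List.replicate (2 * n) '\n' := by
  induction n with
  | zero => simp
  | succ m ih =>
    rw [List.replicate_succ, List.flatten_cons, ih,
        show 2 * (m + 1) = 2 + 2 * m by ring, List.replicate_add]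
    rfl

theorem pvJoinNil (xs : List (List Char)) : PySem.Chars.join [] xs = xs.flatten := by
  simp only [PySem.Chars.join, List.intercalate]
  induction xs with
  | nil => simp
  | cons x t ih => cases t <;> simp_all [List.intersperse]

-- the loop invariant tying A's (parts) to B's (out, pending)
def pvInv (parts : List (List Char)) (st : List (List Char) × Nat) : Prop :=
  (parts = [] ↔ st.1 = []) ∧
  (st.1 = [] → st.2 = 0) ∧
  List.foldl pvJoinStep [] parts = st.1.flatten ++ List.replicate (2 * st.2) '\n' ∧
  (st.1 ≠ [] → pvNoWs st.1.flatten)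

theorem pvInvStep (parts out : List (List Char)) (p : Nat) (l : List Char)
    (h : pvInv parts (out, p)) : pvInv (pvPartsStep parts l) (pvAltStep (out, p) l) := by
  obtain ⟨hiff, hp0, hR, hNoWs⟩ := h
  by_cases hs : PySem.Chars.strip l = []
  · have e1 : pvPartsStep parts l = if parts = [] then parts else parts ++ [['\n', '\n']] := by
      simp [pvPartsStep, hs]
    have e2 : pvAltStep (out, p) l = if out = [] then (out, p) else (out, p + 1) := by
      simp [pvAltStep, hs]
    rw [e1, e2]
    by_cases ho : out = []
    · rw [if_pos (hiff.mpr ho), if_pos ho]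
      exact ⟨hiff, hp0, hR, hNoWs⟩
    · have hparts : parts ≠ [] := fun e => ho (hiff.mp e)
      rw [if_neg hparts, if_neg ho]
      refine ⟨by simp [ho], fun e => absurd e ho, ?_, fun _ => hNoWs ho⟩
      rw [List.foldl_append, List.foldl_cons, List.foldl_nil,
          show pvJoinStep (List.foldl pvJoinStep [] parts) ['\n', '\n'] =
            List.foldl pvJoinStep [] parts ++ ['\n', '\n'] from by simp [pvJoinStep],
          hR, show (2 * (p + 1)) = 2 * p + 2 from by ring, List.replicate_add, List.append_assoc]
      rfl
  · have hNs : pvNoWs (PySem.Chars.strip l) := pvNoWs_strip l hs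
    obtain ⟨c, hlastc⟩ : ∃ c, (PySem.Chars.strip l).getLast? = some c :=
      Option.ne_none_iff_exists'.mp (by simp [List.getLast?_eq_none_iff, hs])
    have hget : PySem.List.pyGet? (PySem.Chars.strip l) (-1) = some c := by
      rw [pvPyGet_neg_one _ hs]; exact hlastc
    set s' := if PySem.Chars.isIn [c] ".!?;:,".toList then PySem.Chars.strip l
              else PySem.Chars.strip l ++ ['.'] with hs'
    have hNs' : pvNoWs s' := by
      rw [hs']; split
      · exact hNs
      · exact pvNoWs_dot _ hNs
    have hs'nn : s' ≠ ['\n', '\n'] := by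
      intro e
      have := hNs'.2.1 '\n' (by rw [e]; rfl)
      rw [show PySem.Chars.isspace '\n' = true from by decide] at this
      exact absurd this (by decide)
    have e1 : pvPartsStep parts l = parts ++ [s'] := by
      rw [hs']; simp [pvPartsStep, hs, hget]
    have e2 : pvAltStep (out, p) l =
        if out = [] then ([s'], 0)
        else (out ++ [(if p = 0 then [' '] else (List.replicate p ['\n', '\n']).flatten), s'], 0) := by
      rw [hs']; simp [pvAltStep, hs, hget]
    rw [e1, e2]
    by_cases ho : out = []
    · rw [if_pos ho]
      have hparts : parts = [] := hiff.mpr ho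
      have hp' : p = 0 := hp0 ho
      refine ⟨by simp, fun _ => rfl, ?_, fun _ => by simpa using hNs'⟩
      rw [hparts]
      simp [pvJoinStep, hs'nn]
    · rw [if_neg ho]
      have hparts : parts ≠ [] := fun e => ho (hiff.mp e)
      have hJ : pvNoWs out.flatten := hNoWs ho
      refine ⟨by simp [hparts], by simp, ?_, ?_⟩
      · rw [List.foldl_append, List.foldl_cons, List.foldl_nil, hR]
        by_cases hpz : p = 0
        · rw [hpz]
          simp only [Nat.mul_zero, List.replicate_zero, List.append_nil]
          rw [show pvJoinStep out.flatten s' = out.flatten ++ ([' '] ++ s') from by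
                simp [pvJoinStep, hs'nn, hJ.1, pvEndswith_false _ hJ]]
          simp
        · have hpad : (List.replicate (2 * p) '\n') ≠ [] := by
            simp [List.replicate_eq_nil_iff]; omega
          have hlastR : (out.flatten ++ List.replicate (2 * p) '\n').getLast? = some '\n' := by
            rw [List.getLast?_append_of_ne_nil _ hpad]
            exact pvGetLast?_replicate _ _ (by omega)
          rw [show pvJoinStep (out.flatten ++ List.replicate (2 * p) '\n') s' =
                (out.flatten ++ List.replicate (2 * p) '\n') ++ s' from by
                simp [pvJoinStep, hs'nn, pvEndswith_true _ hlastR]]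
          simp [hpz, pvFlattenRepl, List.append_assoc]
      · intro _
        by_cases hpz : p = 0
        · simpa [hpz] using pvNoWs_append out.flatten [' '] s' hJ hNs'
        · simpa [hpz, pvFlattenRepl] using
            pvNoWs_append out.flatten (List.replicate (2 * p) '\n') s' hJ hNs'

theorem pvInvFold (lines : List (List Char)) :
    ∀ parts st, pvInv parts st →
      pvInv (lines.foldl pvPartsStep parts) (lines.foldl pvAltStep st) := by
  induction lines with
  | nil => intro parts st h; exact h
  | cons l t ih =>
    intro parts st h
    obtain ⟨out, p⟩ := st
    exact ih _ _ (pvInvStep parts out p l h)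

-- ===== VERDICT (by name: the statement is the Claim_ definition above) =====
theorem clean_text_for_speech_spec : Claim_equal_clean_text_for_speech := by
  intro text _
  show clean_text_for_speech text = clean_text_for_speech_alt text
  obtain ⟨hiff, hp0, hR, hNoWs⟩ :=
    pvInvFold ((PySem.Str.splitlines text).map String.toList) [] ([], 0)
      ⟨Iff.rfl, fun _ => rfl, by simp, fun e => absurd rfl e⟩
  show String.ofList (PySem.Chars.strip (List.foldl pvJoinStep []
      (List.foldl pvPartsStep [] (List.map String.toList (PySem.Str.splitlines text))))) =
    String.ofList (PySem.Chars.join []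
      (List.foldl pvAltStep ([], 0) (List.map String.toList (PySem.Str.splitlines text))).1)
  rw [pvJoinNil, hR]
  congr 1
  by_cases ho : (List.foldl pvAltStep ([], 0) (List.map String.toList (PySem.Str.splitlines text))).1 = []
  · rw [ho, hp0 ho]
    simp [PySem.Chars.strip, PySem.Chars.lstrip, PySem.Chars.rstrip]
  · exact pvStrip_append_ws _ _ (hNoWs ho)
      (fun c hc => by rw [List.eq_of_mem_replicate hc]; decide)
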